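-- pv_equiv track=rewrite | github.com/phuchung12tn4/thuchanhnhom1 | chuong2_bai14.py | DayConDauTien
-- ===== SOURCE A (Python) =====
-- def DayConDauTien(a, b):
--     for i in range(len(a)):
--         for j in range(len(b)):
--             if a[i] == b[j]:
--                 k = 1
--                 while i+k < len(a) and j+k < len(b) and a[i+k] == b[j+k]:
--                     k += 1
--                 if k > 1:
--                     return a[i:i+k]
--     return []
-- ===== SOURCE B (Python) =====
-- def DayConDauTien(a, b):
--     first = {}
--     for j in range(len(b) - 1):
--         key = (b[j], b[j + 1])
--         if key not in first:
--             first[key] = j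
--     for i in range(len(a) - 1):
--         j = first.get((a[i], a[i + 1]))
--         if j is not None:
--             k = 2
--             for x, y in zip(a[i + 2:], b[j + 2:]):
--                 if x != y:
--                     break
--                 k += 1
--             return a[i:i + k]
--     return []
-- ===== Notes on version B (the rewrite author's own statement) =====
-- stated objective: faster
-- what changed: Replaced the inner scan of b for every i by a dict built once mapping each bigram of b to its first index; the scan over a then does one hash lookup per position and extends the match once.
import Mathlib
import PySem

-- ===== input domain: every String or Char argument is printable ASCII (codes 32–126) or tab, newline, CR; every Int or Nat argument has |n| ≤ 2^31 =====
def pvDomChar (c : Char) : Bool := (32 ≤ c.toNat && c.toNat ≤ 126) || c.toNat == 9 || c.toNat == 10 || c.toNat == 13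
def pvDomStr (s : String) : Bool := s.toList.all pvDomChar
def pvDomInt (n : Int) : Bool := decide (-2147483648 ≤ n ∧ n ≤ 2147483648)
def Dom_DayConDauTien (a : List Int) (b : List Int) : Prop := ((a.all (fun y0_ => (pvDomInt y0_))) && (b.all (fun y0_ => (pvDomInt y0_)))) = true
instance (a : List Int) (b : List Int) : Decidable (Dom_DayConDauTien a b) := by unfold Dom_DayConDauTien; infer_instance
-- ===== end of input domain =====

-- B replaces A's inner scan of b by a dict from bigram to first index in b, built once;
-- the loops below carry an explicit fuel argument only as a totality guard (always ample).

-- ===== PORT A =====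
-- A's while loop: k increments while a[i+k] == b[j+k] and both indices are in range.
-- Indices are Nat (Python's are nonnegative here); a[x] for checked x < len is List.getD x 0.
-- Fuel a.length suffices: each step needs i + k < a.length and increments k.
def matchExt (a b : List Int) (i j : Nat) : Nat → Nat → Nat
  | 0, k => k
  | fuel + 1, k =>
    if i + k < a.length ∧ j + k < b.length ∧ a.getD (i + k) 0 = b.getD (j + k) 0 then
      matchExt a b i j fuel (k + 1)
    else k

-- A's inner `for j` loop (fuel b.length); `some r` models the early `return a[i:i+k]`
-- (a[i:i+k] with 0 ≤ i, 0 ≤ k is (a.drop i).take k).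
def innerA (a b : List Int) (i : Nat) : Nat → Nat → Option (List Int)
  | 0, _ => none
  | fuel + 1, j =>
    if j < b.length then
      if a.getD i 0 = b.getD j 0 then
        -- Python's local k = (A's while result); inlined at its two uses
        if 1 < matchExt a b i j a.length 1 then
          some ((a.drop i).take (matchExt a b i j a.length 1))
        else innerA a b i fuel (j + 1)
      else innerA a b i fuel (j + 1)
    else none

-- A's outer `for i` loop (fuel a.length).
def outerA (a b : List Int) : Nat → Nat → List Int
  | 0, _ => []
  | fuel + 1, i =>
    if i < a.length then
      match innerA a b i b.length 0 with
      | some r => r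
      | none => outerA a b fuel (i + 1)
    else []

def DayConDauTien (a : List Int) (b : List Int) : List Int := outerA a b a.length 0

-- ===== PORT B =====
-- B's first loop (fuel b.length): dict mapping each bigram of b to its first index
-- (`if key not in first`).
def buildIdx (b : List Int) : Nat → Nat → PySem.Dict (Int × Int) Nat → PySem.Dict (Int × Int) Nat
  | 0, _, d => d
  | fuel + 1, j, d =>
    if j + 1 < b.length then
      if d.contains (b.getD j 0, b.getD (j + 1) 0) then
        buildIdx b fuel (j + 1) d
      else
        buildIdx b fuel (j + 1) (d.insert (b.getD j 0, b.getD (j + 1) 0) j)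
    else d

-- B's `for x, y in zip(a[i+2:], b[j+2:])` loop: common-prefix length of the two suffixes.
def commonLen : List Int → List Int → Nat
  | x :: xs, y :: ys => if x = y then commonLen xs ys + 1 else 0
  | _, _ => 0

-- B's `for i` loop (fuel a.length): one dict lookup per position, extend and return on a hit.
def scanB (a b : List Int) (d : PySem.Dict (Int × Int) Nat) : Nat → Nat → List Int
  | 0, _ => []
  | fuel + 1, i =>
    if i + 1 < a.length then
      match d.get? (a.getD i 0, a.getD (i + 1) 0) with
      | some j => (a.drop i).take (2 + commonLen (a.drop (i + 2)) (b.drop (j + 2)))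
      | none => scanB a b d fuel (i + 1)
    else []

def DayConDauTien_alt (a : List Int) (b : List Int) : List Int :=
  scanB a b (buildIdx b b.length 0 PySem.Dict.empty) a.length 0

-- ===== PRECONDITION & SPEC =====
def Spec_DayConDauTien (a : List Int) (b : List Int) (out : List Int) : Prop := out = DayConDauTien_alt a b
instance (a : List Int) (b : List Int) (out : List Int) : Decidable (Spec_DayConDauTien a b out) := by unfold Spec_DayConDauTien; infer_instance

-- ===== CLAIM (what is proved, stated in full; the proofs are below) =====
def Claim_equal_DayConDauTien : Prop := ∀ (a : List Int) (b : List Int), Dom_DayConDauTien a b → Spec_DayConDauTien a b (DayConDauTien a b)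

-- ===== LEMMAS AND PROOFS =====

-- proof-only: the first j' ≥ j whose bigram in b equals key
def findBig (b : List Int) (key : Int × Int) : Nat → Nat → Option Nat
  | 0, _ => none
  | fuel + 1, j =>
    if j + 1 < b.length then
      if (b.getD j 0, b.getD (j + 1) 0) = key then some j else findBig b key fuel (j + 1)
    else none

theorem commonLen_nil_left (ys : List Int) : commonLen [] ys = 0 := by
  cases ys <;> rfl

theorem commonLen_nil_right (xs : List Int) : commonLen xs [] = 0 := by
  cases xs <;> rfl

theorem commonLen_drop_pos_iff (a b : List Int) (m n : Nat) :
    0 < commonLen (a.drop m) (b.drop n) ↔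
      (m < a.length ∧ n < b.length ∧ a.getD m 0 = b.getD n 0) := by
  by_cases ha : m < a.length
  · by_cases hb : n < b.length
    · rw [List.drop_eq_getElem_cons ha, List.drop_eq_getElem_cons hb, commonLen,
        List.getD_eq_getElem a 0 ha, List.getD_eq_getElem b 0 hb]
      by_cases he : a[m] = b[n]
      · rw [if_pos he]
        simp [ha, hb, he]
      · rw [if_neg he]
        simp [he]
    · rw [show b.drop n = [] from List.drop_eq_nil_of_le (by omega), commonLen_nil_right]
      simp [hb]
  · rw [show a.drop m = [] from List.drop_eq_nil_of_le (by omega), commonLen_nil_left]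
    simp [ha]

theorem matchExt_eq_commonLen (a b : List Int) (i j : Nat) :
    ∀ (fuel k : Nat), a.length ≤ fuel + (i + k) →
      matchExt a b i j fuel k = k + commonLen (a.drop (i + k)) (b.drop (j + k)) := by
  intro fuel
  induction fuel with
  | zero =>
    intro k hf
    rw [matchExt, show a.drop (i + k) = [] from List.drop_eq_nil_of_le (by omega),
      commonLen_nil_left]
    omega
  | succ fuel ih =>
    intro k hf
    rw [matchExt]
    by_cases h : i + k < a.length ∧ j + k < b.length ∧ a.getD (i + k) 0 = b.getD (j + k) 0
    · obtain ⟨ha, hb, he⟩ := h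
      rw [if_pos ⟨ha, hb, he⟩, ih (k + 1) (by omega)]
      rw [show i + (k + 1) = i + k + 1 by omega, show j + (k + 1) = j + k + 1 by omega]
      rw [List.drop_eq_getElem_cons ha, List.drop_eq_getElem_cons hb, commonLen]
      rw [List.getD_eq_getElem a 0 ha, List.getD_eq_getElem b 0 hb] at he
      rw [if_pos he]
      omega
    · rw [if_neg h]
      by_cases ha : i + k < a.length
      · by_cases hb : j + k < b.length
        · have he : ¬ a.getD (i + k) 0 = b.getD (j + k) 0 := fun he => h ⟨ha, hb, he⟩
          rw [List.drop_eq_getElem_cons ha, List.drop_eq_getElem_cons hb, commonLen]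
          rw [List.getD_eq_getElem a 0 ha, List.getD_eq_getElem b 0 hb] at he
          rw [if_neg he]
          omega
        · rw [show b.drop (j + k) = [] from List.drop_eq_nil_of_le (by omega),
            commonLen_nil_right]
          omega
      · rw [show a.drop (i + k) = [] from List.drop_eq_nil_of_le (by omega),
          commonLen_nil_left]
        omega

theorem matchExt_gt1_iff (a b : List Int) (i j : Nat) :
    1 < matchExt a b i j a.length 1 ↔
      (i + 1 < a.length ∧ j + 1 < b.length ∧ a.getD (i + 1) 0 = b.getD (j + 1) 0) := by
  rw [matchExt_eq_commonLen a b i j a.length 1 (by omega)]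
  rw [show (1 : Nat) < 1 + commonLen (a.drop (i + 1)) (b.drop (j + 1)) ↔
    0 < commonLen (a.drop (i + 1)) (b.drop (j + 1)) by omega]
  exact commonLen_drop_pos_iff a b (i + 1) (j + 1)

theorem buildIdx_get? (b : List Int) (key : Int × Int) :
    ∀ (fuel j : Nat) (d : PySem.Dict (Int × Int) Nat), b.length ≤ fuel + (j + 1) →
      (buildIdx b fuel j d).get? key = (d.get? key).or (findBig b key fuel j) := by
  intro fuel
  induction fuel with
  | zero =>
    intro j d hf
    rw [buildIdx, findBig]
    cases d.get? key <;> rfl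
  | succ fuel ih =>
    intro j d hf
    rw [buildIdx, findBig]
    by_cases h : j + 1 < b.length
    · rw [if_pos h, if_pos h]
      by_cases hc : d.contains (b.getD j 0, b.getD (j + 1) 0)
      · rw [if_pos hc, ih (j + 1) d (by omega)]
        by_cases hk : (b.getD j 0, b.getD (j + 1) 0) = key
        · rw [if_pos hk]
          have hs : (d.get? key).isSome := by
            rw [← hk, ← PySem.Dict.contains_eq_isSome_get?]; exact hc
          rcases Option.isSome_iff_exists.mp hs with ⟨v, hv⟩
          simp [hv]
        · rw [if_neg hk]
      · rw [if_neg hc, ih (j + 1) _ (by omega)]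
        by_cases hk : (b.getD j 0, b.getD (j + 1) 0) = key
        · rw [if_pos hk]
          have hn : d.get? key = none := by
            rw [← hk, PySem.Dict.get?_eq_none_iff_contains]
            simpa using hc
          rw [PySem.Dict.get?_insert, if_pos hk.symm, hn]
          simp
        · rw [if_neg hk, PySem.Dict.get?_insert, if_neg (fun e => hk e.symm)]
    · rw [if_neg h, if_neg h]
      cases d.get? key <;> rfl

theorem findBig_some (b : List Int) (key : Int × Int) :
    ∀ (fuel j j' : Nat), findBig b key fuel j = some j' →
      j' + 1 < b.length ∧ b.getD j' 0 = key.1 ∧ b.getD (j' + 1) 0 = key.2 := by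
  intro fuel
  induction fuel with
  | zero => intro j j' h; simp [findBig] at h
  | succ fuel ih =>
    intro j j' h
    rw [findBig] at h
    by_cases hb : j + 1 < b.length
    · rw [if_pos hb] at h
      by_cases hk : (b.getD j 0, b.getD (j + 1) 0) = key
      · rw [if_pos hk] at h
        simp only [Option.some.injEq] at h
        subst h
        exact ⟨hb, congrArg Prod.fst hk, congrArg Prod.snd hk⟩
      · rw [if_neg hk] at h
        exact ih (j + 1) j' h
    · rw [if_neg hb] at h
      simp at h

theorem innerA_none (a b : List Int) (i : Nat) (hi : ¬ i + 1 < a.length) :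
    ∀ (fuel j : Nat), innerA a b i fuel j = none := by
  intro fuel
  induction fuel with
  | zero => intro j; rfl
  | succ fuel ih =>
    intro j
    rw [innerA]
    by_cases hj : j < b.length
    · rw [if_pos hj]
      by_cases heq : a.getD i 0 = b.getD j 0
      · rw [if_pos heq]
        have hk : ¬ 1 < matchExt a b i j a.length 1 := fun hk =>
          hi ((matchExt_gt1_iff a b i j).mp hk).1
        rw [if_neg hk]
        exact ih (j + 1)
      · rw [if_neg heq]
        exact ih (j + 1)
    · rw [if_neg hj]

theorem innerA_char (a b : List Int) (i : Nat) (hi : i + 1 < a.length) :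
    ∀ (fuel j : Nat), b.length ≤ fuel + j →
      innerA a b i fuel j =
        (findBig b (a.getD i 0, a.getD (i + 1) 0) fuel j).map
          (fun j' => (a.drop i).take (matchExt a b i j' a.length 1)) := by
  intro fuel
  induction fuel with
  | zero => intro j hf; rfl
  | succ fuel ih =>
    intro j hf
    rw [innerA, findBig]
    by_cases hj : j < b.length
    · rw [if_pos hj]
      by_cases heq : a.getD i 0 = b.getD j 0
      · rw [if_pos heq]
        by_cases hk : 1 < matchExt a b i j a.length 1
        · have hc := (matchExt_gt1_iff a b i j).mp hk
          rw [if_pos hk, if_pos hc.2.1,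
            if_pos (show (b.getD j 0, b.getD (j + 1) 0) = (a.getD i 0, a.getD (i + 1) 0) by
              rw [Prod.mk.injEq]; exact ⟨heq.symm, hc.2.2.symm⟩)]
          rfl
        · rw [if_neg hk, ih (j + 1) (by omega)]
          by_cases hb : j + 1 < b.length
          · rw [if_pos hb, if_neg]
            intro he
            rw [Prod.mk.injEq] at he
            exact hk ((matchExt_gt1_iff a b i j).mpr ⟨hi, hb, he.2.symm⟩)
          · rw [if_neg hb]
            have : ¬ j + 1 + 1 < b.length := by omega
            cases fuel with
            | zero => rfl
            | succ fuel => rw [findBig, if_neg this]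
      · rw [if_neg heq, ih (j + 1) (by omega)]
        by_cases hb : j + 1 < b.length
        · rw [if_pos hb, if_neg]
          intro he
          rw [Prod.mk.injEq] at he
          exact heq he.1.symm
        · rw [if_neg hb]
          have : ¬ j + 1 + 1 < b.length := by omega
          cases fuel with
          | zero => rfl
          | succ fuel => rw [findBig, if_neg this]
    · rw [if_neg hj, if_neg (show ¬ j + 1 < b.length by omega)]
      rfl

theorem scanB_stop (a b : List Int) (d : PySem.Dict (Int × Int) Nat)
    (fuel i : Nat) (hi : ¬ i + 1 < a.length) : scanB a b d fuel i = [] := by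
  cases fuel with
  | zero => rfl
  | succ fuel => rw [scanB, if_neg hi]

theorem outer_eq (a b : List Int) :
    ∀ (fuel i : Nat),
      outerA a b fuel i = scanB a b (buildIdx b b.length 0 PySem.Dict.empty) fuel i := by
  intro fuel
  induction fuel with
  | zero => intro i; rfl
  | succ fuel ih =>
    intro i
    rw [outerA]
    by_cases h : i < a.length
    · rw [if_pos h]
      by_cases hi : i + 1 < a.length
      · rw [innerA_char a b i hi b.length 0 (by omega)]
        cases hf : findBig b (a.getD i 0, a.getD (i + 1) 0) b.length 0 with
        | none =>
          rw [scanB, if_pos hi, buildIdx_get? b _ b.length 0 _ (by omega),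
            PySem.Dict.get?_empty, hf]
          exact ih (i + 1)
        | some j =>
          obtain ⟨hjb, hb1, hb2⟩ := findBig_some b _ b.length 0 j hf
          rw [scanB, if_pos hi, buildIdx_get? b _ b.length 0 _ (by omega),
            PySem.Dict.get?_empty, hf]
          simp only [Option.map_some, Option.none_or]
          congr 1
          rw [matchExt_eq_commonLen a b i j a.length 1 (by omega)]
          rw [List.drop_eq_getElem_cons (show i + 1 < a.length from hi),
            List.drop_eq_getElem_cons (show j + 1 < b.length from hjb), commonLen]
          have he : a[i + 1] = b[j + 1] := by
            rw [← List.getD_eq_getElem a 0 hi, ← List.getD_eq_getElem b 0 hjb, hb2]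
          rw [if_pos he, show i + 1 + 1 = i + 2 by omega, show j + 1 + 1 = j + 2 by omega]
          omega
      · rw [innerA_none a b i hi b.length 0, ih (i + 1),
          scanB_stop a b _ fuel (i + 1) (by omega), scanB_stop a b _ (fuel + 1) i hi]
    · rw [if_neg h, scanB_stop a b _ (fuel + 1) i (by omega)]

-- ===== VERDICT (by name: the statement is the Claim_ definition above) =====
theorem DayConDauTien_spec : Claim_equal_DayConDauTien := by
  intro a b _
  unfold Spec_DayConDauTien DayConDauTien DayConDauTien_alt
  exact outer_eq a b a.length 0
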